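-- pv_equiv track=rewrite | github.com/sam-flahive/dyl-encryption | dyl_0.1.py | letter_output_VIII
-- ===== SOURCE A (Python) =====
-- list_of_letters_VIII = 'aX<=:{)"O#J0\']7 b$Qjm9|q+hV^sCR%vg43z(-x_SIl5B1p/uAf,rK?L.oUcwi*dNZey~E6HG£!;t@&8>[FnYkT}PMD2W'
--
-- def letter_output_VIII(number, value):
--           order_of_letters = {}
--           for letter in list_of_letters_VIII:
--                    if value % 94 == 0:
--                             order_of_letters[94] = letter
--
--                    else:
--                             order_of_letters[value % 94] = letter
--
--                    value += 1
--           return(order_of_letters[number])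
-- ===== SOURCE B (Python) =====
-- list_of_letters_VIII = 'aX<=:{)"O#J0\']7 b$Qjm9|q+hV^sCR%vg43z(-x_SIl5B1p/uAf,rK?L.oUcwi*dNZey~E6HG£!;t@&8>[FnYkT}PMD2W'
--
-- def letter_output_VIII(number, value):
--     # the loop places letter i at key (value+i) mod 94 (with residue 0 written as 94),
--     # so the letter at key `number` is simply at index (number - value) mod 94
--     return list_of_letters_VIII[(number - value) % 94]
-- ===== Notes on version B (the rewrite author's own statement) =====
-- stated objective: simpler
-- what changed: B drops the 94-iteration dict-building loop and returns list_of_letters_VIII[(number - value) % 94] directly, the closed form of the key the loop assigns.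
import Mathlib
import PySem

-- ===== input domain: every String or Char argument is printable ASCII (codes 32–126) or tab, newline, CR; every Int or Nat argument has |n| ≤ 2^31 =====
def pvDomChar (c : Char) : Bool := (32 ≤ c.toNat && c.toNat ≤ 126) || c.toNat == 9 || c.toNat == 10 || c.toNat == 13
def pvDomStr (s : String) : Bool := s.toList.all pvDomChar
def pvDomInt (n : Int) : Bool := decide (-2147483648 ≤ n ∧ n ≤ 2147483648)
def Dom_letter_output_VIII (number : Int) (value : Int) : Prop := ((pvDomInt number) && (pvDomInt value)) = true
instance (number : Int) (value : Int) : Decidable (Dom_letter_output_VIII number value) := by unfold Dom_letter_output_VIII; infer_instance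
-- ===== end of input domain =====

-- B replaces A's 94-step dict-building loop by the closed-form index (number - value) % 94
-- into the letter string (objective: simpler, O(1) instead of building a 94-entry dict).

-- ===== PORT A =====
-- the module constant list_of_letters_VIII (94 characters)
def lettersVIII : List Char :=
  "aX<=:{)\"O#J0']7 b$Qjm9|q+hV^sCR%vg43z(-x_SIl5B1p/uAf,rK?L.oUcwi*dNZey~E6HG£!;t@&8>[FnYkT}PMD2W".toList

-- the 'for letter in list_of_letters_VIII' loop: state = (order_of_letters, value)
def loopVIII : List Char → PySem.Dict Int String → Int → PySem.Dict Int String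
  | [], d, _ => d
  | c :: cs, d, v =>
      loopVIII cs
        (if PySem.Int.mod v 94 == 0 then d.insert 94 (String.ofList [c])
         else d.insert (PySem.Int.mod v 94) (String.ofList [c]))
        (v + 1)

-- order_of_letters[number]: .get? = none is Python's KeyError, excluded by Pre_
def letter_output_VIII (number : Int) (value : Int) : String :=
  ((loopVIII lettersVIII PySem.Dict.empty value).get? number).getD ""

-- ===== PORT B =====
def letter_output_VIII_alt (number : Int) (value : Int) : String :=
  ((PySem.Str.pyGet?
      "aX<=:{)\"O#J0']7 b$Qjm9|q+hV^sCR%vg43z(-x_SIl5B1p/uAf,rK?L.oUcwi*dNZey~E6HG£!;t@&8>[FnYkT}PMD2W"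
      (PySem.Int.mod (number - value) 94)).map (fun c => String.ofList [c])).getD ""

-- ===== PRECONDITION & SPEC =====
-- A raises KeyError unless number is one of the dict keys 1..94; Pre_ admits exactly those.
def Pre_letter_output_VIII (number : Int) (value : Int) : Prop := 1 ≤ number ∧ number ≤ 94
instance (number : Int) (value : Int) : Decidable (Pre_letter_output_VIII number value) := by
  unfold Pre_letter_output_VIII; infer_instance
def pvWitness_letter_output_VIII : Int × Int := (7, -12)

def Spec_letter_output_VIII (number : Int) (value : Int) (out : String) : Prop :=
  out = letter_output_VIII_alt number value
instance (number : Int) (value : Int) (out : String) : Decidable (Spec_letter_output_VIII number value out) := by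
  unfold Spec_letter_output_VIII; infer_instance

-- ===== CLAIM (what is proved, stated in full; the proofs are below) =====
def Claim_equal_letter_output_VIII : Prop :=
  ∀ (number : Int) (value : Int), Dom_letter_output_VIII number value →
    Pre_letter_output_VIII number value →
    Spec_letter_output_VIII number value (letter_output_VIII number value)

-- ===== LEMMAS AND PROOFS =====

-- After running the loop over cs (at most 94 letters) starting at counter v, looking up a
-- key n ∈ 1..94 finds the letter at offset (n - v) % 94, if that offset was reached.
theorem loopVIII_get (cs : List Char) (h94 : cs.length ≤ 94) (v : Int)
    (d : PySem.Dict Int String) (n : Int) (h1 : 1 ≤ n) (h2 : n ≤ 94) :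
    (loopVIII cs d v).get? n =
      if h : ((n - v) % 94).toNat < cs.length
      then some (String.ofList [cs[((n - v) % 94).toNat]])
      else d.get? n := by
  induction cs generalizing d v with
  | nil => simp [loopVIII]
  | cons c cs ih =>
    simp only [List.length_cons] at h94 ⊢
    have hmod : PySem.Int.mod v 94 = v % 94 := PySem.Int.mod_eq_emod_of_pos (by omega)
    rw [loopVIII, ih (by omega) (v + 1)]
    set k : Int := if PySem.Int.mod v 94 == 0 then 94 else PySem.Int.mod v 94 with hk
    have hdict : (if PySem.Int.mod v 94 == 0 then d.insert 94 (String.ofList [c])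
        else d.insert (PySem.Int.mod v 94) (String.ofList [c]))
        = d.insert k (String.ofList [c]) := by
      rw [hk]; split <;> simp_all
    have hkrange : (v % 94 = 0 ∧ k = 94) ∨ (v % 94 ≠ 0 ∧ k = v % 94) := by
      by_cases hv : v % 94 = 0
      · exact Or.inl ⟨hv, by rw [hk, hmod]; simp [hv]⟩
      · exact Or.inr ⟨hv, by rw [hk, hmod]; simp [hv]⟩
    have hknum : k = n ↔ (n - v) % 94 = 0 := by
      rcases hkrange with ⟨hv, hk'⟩ | ⟨hv, hk'⟩ <;>
        (rw [hk']; constructor <;> intro h <;> omega)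
    rw [hdict]
    by_cases h0 : (n - v) % 94 = 0
    · -- this iteration inserts exactly at key n; no later iteration reaches key n
      rw [hknum.mpr h0]
      have h93 : ((n - (v + 1)) % 94).toNat = 93 := by omega
      rw [dif_neg (by omega : ¬ ((n - (v + 1)) % 94).toNat < cs.length),
          dif_pos (by omega : ((n - v) % 94).toNat < cs.length + 1),
          PySem.Dict.get?_insert_self]
      have hz : ((n - v) % 94).toNat = 0 := by omega
      simp [hz]
    · -- the key inserted this round differs from n
      have hne : n ≠ k := fun h => h0 (hknum.mp h.symm)
      have hm : ((n - (v + 1)) % 94).toNat + 1 = ((n - v) % 94).toNat := by omega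
      by_cases hin : ((n - v) % 94).toNat < cs.length + 1
      · rw [dif_pos (by omega : ((n - (v + 1)) % 94).toNat < cs.length), dif_pos hin]
        have hj : ((n - v) % 94).toNat = ((n - (v + 1)) % 94).toNat + 1 := hm.symm
        simp [hj]
      · rw [dif_neg (by omega : ¬ ((n - (v + 1)) % 94).toNat < cs.length), dif_neg hin]
        exact PySem.Dict.get?_insert_of_ne _ _ hne

theorem lettersVIII_length : lettersVIII.length = 94 := by decide

theorem letter_output_VIII_spec : Claim_equal_letter_output_VIII := by
  intro number value _ hpre
  obtain ⟨h1, h2⟩ := hpre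
  unfold Spec_letter_output_VIII letter_output_VIII letter_output_VIII_alt
  have hidx : ((number - value) % 94).toNat < lettersVIII.length := by
    rw [lettersVIII_length]; omega
  rw [loopVIII_get lettersVIII (by decide) value PySem.Dict.empty number h1 h2,
      dif_pos hidx]
  have hmod : PySem.Int.mod (number - value) 94 = (number - value) % 94 :=
    PySem.Int.mod_eq_emod_of_pos (by omega)
  rw [hmod]
  have hstr : (PySem.Str.pyGet?
      "aX<=:{)\"O#J0']7 b$Qjm9|q+hV^sCR%vg43z(-x_SIl5B1p/uAf,rK?L.oUcwi*dNZey~E6HG£!;t@&8>[FnYkT}PMD2W"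
      ((number - value) % 94)) = lettersVIII[((number - value) % 94).toNat]? := by
    rw [show (number - value) % 94 = (((number - value) % 94).toNat : Int) by omega,
        PySem.Str.pyGet?_natCast]
    rfl
  rw [hstr, List.getElem?_eq_getElem hidx]
  rfl
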